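-- pv_equiv track=rewrite | github.com/sindaaaa/My-Google-Jam-submissions | Qualification Round 2020/Parenting-parenting-returns.py | tache
-- ===== SOURCE A (Python) =====
-- def tache(L,t):
--     ch1=''
--     ch='C'
--     C=[]
--     C.append(L[0])
--     C.append(L[1])
--     J=[]
--     for i in range(2,len(L)-1,2):
--         T=True
--         T1=True
--         c=0
--         while (c<len(C)-1) and (T==True):
--             if (((int(L[i])>= int(C[c])))and((int(L[i])< int(C[c+1]))))or(((int(L[i+1])>int(C[c])))and((int(L[i+1])<= int(C[c+1])))):
--                 T=False
--
--             else:c+=2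
--
--         if T==True:
--             C.append(L[i])
--             C.append(L[i+1])
--             ch+='C'
--         else:
--             if len(J)==0:
--                 J.append(L[i])
--                 J.append(L[i+1])
--                 ch+='J'
--             else:
--                 j=0
--                 while(j<len(J)-1)and (T1==True):
--                     if (((int(L[i])>= int(J[j])))and((int(L[i])< int(J[j+1]))))or(((int(L[i+1])> int(J[j])))and((int(L[i+1])<= int(J[j+1])))):
--                         T1=False
--                     else:j+=2
--
--                 if T1==True:
--                     J.append(L[i])
--                     J.append(L[i+1])
--                     ch+='J'
--
--                 else:ch1='IMPOSSIBLE'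
--
--
--     if ch1=='IMPOSSIBLE':
--         return ch1
--     else: return ch
-- ===== SOURCE B (Python) =====
-- def tache(L, t):
--     # Segment-tree interval-stabbing: coordinate-compress the endpoints once, keep one
--     # prefix-max segment tree per schedule (max stored end, keyed by compressed start),
--     # and answer each overlap-existence test with two O(log n) prefix-max queries.
--     # Conflict with a stored interval (c, d) means (c <= a < d) or (c < b <= d), i.e.
--     # max{d : c <= a} > a  or  max{d : c < b} >= b.
--     xs = sorted(set(L))
--     m = len(xs)
--
--     def idx(v):  # hand-written bisect_left over the sorted distinct endpoints
--         lo, hi = 0, m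
--         while lo < hi:
--             mid = (lo + hi) // 2
--             if xs[mid] < v:
--                 lo = mid + 1
--             else:
--                 hi = mid
--         return lo
--
--     def empty(lo, hi):  # tree node = ('leaf', max) | ('node', max, left, right)
--         if hi - lo <= 1:
--             return ('leaf', None)
--         mid = (lo + hi) // 2
--         return ('node', None, empty(lo, mid), empty(mid, hi))
--
--     def bump(old, val):
--         return val if old is None or val > old else old
--
--     def update(node, lo, hi, pos, val):  # raise the max at leaf `pos` to >= val
--         if node[0] == 'leaf':
--             return ('leaf', bump(node[1], val))
--         mid = (lo + hi) // 2
--         _, mx, left, right = node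
--         if pos < mid:
--             return ('node', bump(mx, val), update(left, lo, mid, pos, val), right)
--         return ('node', bump(mx, val), left, update(right, mid, hi, pos, val))
--
--     def query(node, lo, hi, k):  # max over leaf positions < k (None if none stored)
--         if k <= lo:
--             return None
--         if hi <= k:
--             return node[1]
--         mid = (lo + hi) // 2
--         a = query(node[2], lo, mid, k)
--         b = query(node[3], mid, hi, k)
--         if a is None:
--             return b
--         if b is None:
--             return a
--         return a if a > b else b
--
--     def conflicts(tree, a, b):
--         q1 = query(tree, 0, m, idx(a) + 1)
--         if q1 is not None and q1 > a:
--             return True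
--         q2 = query(tree, 0, m, idx(b))
--         return q2 is not None and q2 >= b
--
--     C = update(empty(0, m), 0, m, idx(L[0]), L[1])
--     J = empty(0, m)
--     out = 'C'
--     i = 2
--     while i < len(L) - 1:
--         a, b = L[i], L[i + 1]
--         if not conflicts(C, a, b):
--             C = update(C, 0, m, idx(a), b)
--             out += 'C'
--         elif not conflicts(J, a, b):
--             J = update(J, 0, m, idx(a), b)
--             out += 'J'
--         else:
--             return 'IMPOSSIBLE'
--         i += 2
--     return out
-- ===== Notes on version B (the rewrite author's own statement) =====
-- stated objective: faster
-- what changed: B coordinate-compresses the endpoints once and keeps a prefix-max segment tree of stored interval ends per schedule, answering each overlap-existence test with two O(log n) prefix-max queries instead of A's linear rescan of all previously stored endpoints.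
import Mathlib
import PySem

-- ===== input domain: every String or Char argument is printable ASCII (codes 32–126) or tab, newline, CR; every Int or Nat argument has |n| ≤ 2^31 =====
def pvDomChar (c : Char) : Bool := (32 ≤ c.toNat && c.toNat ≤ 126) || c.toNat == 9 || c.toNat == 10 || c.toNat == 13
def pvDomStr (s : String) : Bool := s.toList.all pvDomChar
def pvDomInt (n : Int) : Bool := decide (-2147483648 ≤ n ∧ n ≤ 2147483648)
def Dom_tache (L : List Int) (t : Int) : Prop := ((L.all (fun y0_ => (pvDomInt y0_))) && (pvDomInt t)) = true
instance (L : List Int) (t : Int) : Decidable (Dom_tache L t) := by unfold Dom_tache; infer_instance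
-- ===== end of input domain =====

-- B replaces A's linear rescans by per-schedule prefix-max segment trees over the
-- coordinate-compressed endpoints (two O(log n) stabbing queries per interval); same
-- return value on every list with at least 2 elements (objective: faster, O(n log n) vs O(n^2)).

-- ===== PORT A =====
-- xs[i]: all list accesses made by A and B are in range under Pre_tache, so the total form with default 0 is exact there
def pvIdx (L : List Int) (i : Int) : Int := (PySem.List.pyGet? L i).getD 0

-- the (duplicated) overlap test inside A's two while loops
def predA (a b c d : Int) : Bool := (decide (a ≥ c) && decide (a < d)) || (decide (b > c) && decide (b ≤ d))

-- A's inner while loop: scans S two at a time, returns the final value of the flag T (resp. T1)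
def scanA (a b : Int) (S : List Int) (c : Nat) : Bool :=
  if _h : c < S.length - 1 then
    if predA a b (S.getD c 0) (S.getD (c + 1) 0) then false
    else scanA a b S (c + 2)
  else true
termination_by S.length - c
decreasing_by omega

-- one iteration of A's for loop over the state (ch1, ch, C, J)
def stepA (L : List Int) (st : String × String × List Int × List Int) (i : Int) :
    String × String × List Int × List Int :=
  let a := pvIdx L i
  let b := pvIdx L (i + 1)
  let T := scanA a b st.2.2.1 0
  if T then (st.1, st.2.1 ++ "C", st.2.2.1 ++ [a, b], st.2.2.2)
  else if st.2.2.2.length == 0 then (st.1, st.2.1 ++ "J", st.2.2.1, st.2.2.2 ++ [a, b])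
  else
    let T1 := scanA a b st.2.2.2 0
    if T1 then (st.1, st.2.1 ++ "J", st.2.2.1, st.2.2.2 ++ [a, b])
    else ("IMPOSSIBLE", st.2.1, st.2.2.1, st.2.2.2)

def tache (L : List Int) (t : Int) : String :=
  let st := List.foldl (stepA L)
    ("", "C", [pvIdx L 0, pvIdx L 1], ([] : List Int))
    (PySem.List.pyRange 2 ((L.length : Int) - 1) 2)
  if st.1 = "IMPOSSIBLE" then st.1 else st.2.1

-- ===== PORT B =====
-- hand-written bisect_left of Source B (xs[mid] is always in range: 0 ≤ lo ≤ mid < hi ≤ len xs)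
def idxGo (xs : List Int) (v : Int) (lo hi : Nat) : Nat :=
  if lo < hi then
    let mid := (lo + hi) / 2
    if xs.getD mid 0 < v then idxGo xs v (mid + 1) hi else idxGo xs v lo mid
  else lo
termination_by hi - lo
decreasing_by all_goals omega

-- Source B's tree value ('leaf', max) | ('node', max, left, right), ported as an inductive
inductive Seg where
  | leaf : Option Int → Seg
  | node : Option Int → Seg → Seg → Seg

def segTop : Seg → Option Int
  | .leaf v => v
  | .node v _ _ => v

def emptySeg (lo hi : Nat) : Seg :=
  if hi - lo ≤ 1 then .leaf none
  else .node none (emptySeg lo ((lo + hi) / 2)) (emptySeg ((lo + hi) / 2) hi)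
termination_by hi - lo
decreasing_by all_goals omega

def bump (old : Option Int) (val : Int) : Int :=
  match old with
  | none => val
  | some o => if val > o then val else o

-- Source B's update; Python dispatches on the 'leaf'/'node' tag, here the constructor
def updateSeg : Seg → Nat → Nat → Nat → Int → Seg
  | .leaf old, _, _, _, val => .leaf (some (bump old val))
  | .node mx l r, lo, hi, pos, val =>
    let mid := (lo + hi) / 2
    if pos < mid then .node (some (bump mx val)) (updateSeg l lo mid pos val) r
    else .node (some (bump mx val)) l (updateSeg r mid hi pos val)

-- Source B's query combine (None-absorbing max)
def qmax (a b : Option Int) : Option Int :=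
  match a, b with
  | none, b => b
  | some a, none => some a
  | some a, some b => some (if a > b then a else b)

def querySeg (s : Seg) (lo hi k : Nat) : Option Int :=
  if k ≤ lo then none
  else if hi ≤ k then segTop s
  else match s with
    | .leaf v => v
    | .node _ l r => qmax (querySeg l lo ((lo + hi) / 2) k) (querySeg r ((lo + hi) / 2) hi k)

def conflictsT (xs : List Int) (m : Nat) (tr : Seg) (a b : Int) : Bool :=
  if (querySeg tr 0 m (idxGo xs a 0 m + 1)).elim false (fun v => decide (v > a)) then true
  else (querySeg tr 0 m (idxGo xs b 0 m)).elim false (fun v => decide (v ≥ b))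

-- Source B's main while loop (i = 2, 4, …, while i < len(L) - 1)
def goBT (L : List Int) (xs : List Int) (m : Nat) (C J : Seg) (out : String) (i : Nat) : String :=
  if i + 1 < L.length then
    let a := pvIdx L (i : Int)
    let b := pvIdx L ((i : Int) + 1)
    if !conflictsT xs m C a b then
      goBT L xs m (updateSeg C 0 m (idxGo xs a 0 m) b) J (out ++ "C") (i + 2)
    else if !conflictsT xs m J a b then
      goBT L xs m C (updateSeg J 0 m (idxGo xs a 0 m) b) (out ++ "J") (i + 2)
    else "IMPOSSIBLE"
  else out
termination_by L.length - i
decreasing_by all_goals omega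

def tache_alt (L : List Int) (t : Int) : String :=
  let xs := PySem.List.sorted (PySem.Set.ofList L) (fun x => x) false
  let m := xs.length
  goBT L xs m
    (updateSeg (emptySeg 0 m) 0 m (idxGo xs (pvIdx L 0) 0 m) (pvIdx L 1))
    (emptySeg 0 m) "C" 2

-- ===== PRECONDITION & SPEC =====
-- Pre_ excludes lists of fewer than 2 elements, on which the Python A raises IndexError at L[0]/L[1]
def Pre_tache (L : List Int) (t : Int) : Prop := 2 ≤ L.length
instance (L : List Int) (t : Int) : Decidable (Pre_tache L t) := by unfold Pre_tache; infer_instance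

def pvWitness_tache : List Int × Int := ([1, 3, 2, 4, 3, 5], 0)

def Spec_tache (L : List Int) (t : Int) (out : String) : Prop := out = tache_alt L t
instance (L : List Int) (t : Int) (out : String) : Decidable (Spec_tache L t out) := by unfold Spec_tache; infer_instance

-- ===== CLAIM (what is proved, stated in full; the proofs are below) =====
def Claim_equal_tache : Prop := ∀ (L : List Int) (t : Int), Dom_tache L t → Pre_tache L t → Spec_tache L t (tache L t)

-- ===== LEMMAS AND PROOFS =====

-- list-of-pairs view of a schedule, shared intermediate of both directions
def flatP (P : List (Int × Int)) : List Int := P.flatMap (fun p => [p.1, p.2])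

def conflictsB (a b : Int) (S : List (Int × Int)) : Bool :=
  S.any (fun cd => predA a b cd.1 cd.2)

-- intermediate program: Source B's control flow over bare pair lists
def goList (L : List Int) (r : List Int) (Cp Jp : List (Int × Int)) (out : String) : String :=
  match r with
  | [] => out
  | i :: rest =>
    let a := pvIdx L i
    let b := pvIdx L (i + 1)
    if !conflictsB a b Cp then goList L rest (Cp ++ [(a, b)]) Jp (out ++ "C")
    else if !conflictsB a b Jp then goList L rest Cp (Jp ++ [(a, b)]) (out ++ "J")
    else "IMPOSSIBLE"

theorem flatP_append_pair (P : List (Int × Int)) (a b : Int) :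
    flatP (P ++ [(a, b)]) = flatP P ++ [a, b] := by
  simp [flatP]

theorem scanA_shift (a b x y : Int) (S : List Int) (c : Nat) :
    scanA a b (x :: y :: S) (c + 2) = scanA a b S c := by
  have H : ∀ m c, S.length - c ≤ m → scanA a b (x :: y :: S) (c + 2) = scanA a b S c := by
    intro m
    induction m with
    | zero =>
      intro c hc
      conv_lhs => rw [scanA]
      conv_rhs => rw [scanA]
      rw [dif_neg (by simp only [List.length_cons]; omega), dif_neg (by omega)]
    | succ m ih =>
      intro c hc
      conv_lhs => rw [scanA]
      conv_rhs => rw [scanA]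
      by_cases h : c < S.length - 1
      · rw [dif_pos (by simp only [List.length_cons]; omega), dif_pos h]
        have g0 : (x :: y :: S).getD (c + 2) 0 = S.getD c 0 := rfl
        have g1 : (x :: y :: S).getD (c + 2 + 1) 0 = S.getD (c + 1) 0 := rfl
        rw [g0, g1]
        by_cases hp : predA a b (S.getD c 0) (S.getD (c + 1) 0)
        · rw [if_pos hp, if_pos hp]
        · rw [if_neg hp, if_neg hp]
          exact ih (c + 2) (by omega)
      · rw [dif_neg (by simp only [List.length_cons]; omega), dif_neg h]
  exact H S.length c (by omega)

theorem conflictsB_cons (a b : Int) (p : Int × Int) (P : List (Int × Int)) :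
    conflictsB a b (p :: P) = (predA a b p.1 p.2 || conflictsB a b P) := rfl

theorem scanA_eq_conflicts (a b : Int) (P : List (Int × Int)) :
    scanA a b (flatP P) 0 = !conflictsB a b P := by
  induction P with
  | nil =>
    rw [scanA]
    simp [flatP, conflictsB]
  | cons p P ih =>
    have hfl : flatP (p :: P) = p.1 :: p.2 :: flatP P := rfl
    rw [hfl]
    conv_lhs => rw [scanA]
    rw [dif_pos (by simp only [List.length_cons]; omega)]
    have g0 : (p.1 :: p.2 :: flatP P).getD 0 0 = p.1 := rfl
    have g1 : (p.1 :: p.2 :: flatP P).getD (0 + 1) 0 = p.2 := rfl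
    rw [g0, g1, conflictsB_cons]
    by_cases hp : predA a b p.1 p.2
    · rw [if_pos hp, hp]
      simp
    · rw [if_neg hp, scanA_shift a b p.1 p.2 (flatP P) 0, ih,
          Bool.eq_false_iff.mpr hp]
      simp

theorem stepA_fst (L : List Int) (st : String × String × List Int × List Int) (i : Int) :
    (stepA L st i).1 = st.1 ∨ (stepA L st i).1 = "IMPOSSIBLE" := by
  simp only [stepA]
  split_ifs <;> simp

theorem foldl_imp (L : List Int) (r : List Int) :
    ∀ st : String × String × List Int × List Int, st.1 = "IMPOSSIBLE" →
      (List.foldl (stepA L) st r).1 = "IMPOSSIBLE" := by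
  induction r with
  | nil => intro st h; simpa using h
  | cons i rest ih =>
    intro st h
    simp only [List.foldl_cons]
    apply ih
    rcases stepA_fst L st i with h' | h' <;> simp [h', h]

theorem main_inv (L : List Int) (r : List Int) :
    ∀ (Cp Jp : List (Int × Int)) (out : String),
      (if (List.foldl (stepA L) ("", out, flatP Cp, flatP Jp) r).1 = "IMPOSSIBLE"
       then (List.foldl (stepA L) ("", out, flatP Cp, flatP Jp) r).1
       else (List.foldl (stepA L) ("", out, flatP Cp, flatP Jp) r).2.1)
      = goList L r Cp Jp out := by
  induction r with
  | nil =>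
    intro Cp Jp out
    simp only [List.foldl_nil, goList]
    rw [if_neg (by decide)]
  | cons i rest ih =>
    intro Cp Jp out
    simp only [List.foldl_cons, goList]
    cases hc : conflictsB (pvIdx L i) (pvIdx L (i + 1)) Cp with
    | false =>
      have h1 : stepA L ("", out, flatP Cp, flatP Jp) i
          = ("", out ++ "C",
             flatP (Cp ++ [(pvIdx L i, pvIdx L (i + 1))]), flatP Jp) := by
        simp only [stepA, scanA_eq_conflicts, hc, flatP_append_pair]
        simp
      rw [h1]
      simpa using ih (Cp ++ [(pvIdx L i, pvIdx L (i + 1))]) Jp (out ++ "C")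
    | true =>
      cases Jp with
      | nil =>
        have hj : conflictsB (pvIdx L i) (pvIdx L (i + 1)) ([] : List (Int × Int)) = false := rfl
        have h1 : stepA L ("", out, flatP Cp, flatP []) i
            = ("", out ++ "J", flatP Cp,
               flatP ([] ++ [(pvIdx L i, pvIdx L (i + 1))])) := by
          simp only [stepA, scanA_eq_conflicts, hc, flatP_append_pair]
          simp [flatP]
        rw [h1, hj]
        simpa using ih Cp ([] ++ [(pvIdx L i, pvIdx L (i + 1))]) (out ++ "J")
      | cons q Q =>
        cases hj : conflictsB (pvIdx L i) (pvIdx L (i + 1)) (q :: Q) with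
        | false =>
          have h1 : stepA L ("", out, flatP Cp, flatP (q :: Q)) i
              = ("", out ++ "J", flatP Cp,
                 flatP ((q :: Q) ++ [(pvIdx L i, pvIdx L (i + 1))])) := by
            simp only [stepA, scanA_eq_conflicts, hc, hj, flatP_append_pair]
            simp [flatP]
          rw [h1]
          simpa using ih Cp ((q :: Q) ++ [(pvIdx L i, pvIdx L (i + 1))]) (out ++ "J")
        | true =>
          have h1 : stepA L ("", out, flatP Cp, flatP (q :: Q)) i
              = ("IMPOSSIBLE", out, flatP Cp, flatP (q :: Q)) := by
            simp only [stepA, scanA_eq_conflicts, hc, hj]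
            simp [flatP]
          rw [h1]
          have := foldl_imp L rest
            ("IMPOSSIBLE", out, flatP Cp, flatP (q :: Q)) rfl
          simp [this]

theorem tache_eq_goList (L : List Int) (t : Int) :
    tache L t = goList L (PySem.List.pyRange 2 ((L.length : Int) - 1) 2)
      [(pvIdx L 0, pvIdx L 1)] [] "C" := by
  unfold tache
  have h := main_inv L (PySem.List.pyRange 2 ((L.length : Int) - 1) 2)
      [(pvIdx L 0, pvIdx L 1)] [] "C"
  have hflat : flatP [(pvIdx L 0, pvIdx L 1)] = [pvIdx L 0, pvIdx L 1] := rfl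
  have hnil : flatP ([] : List (Int × Int)) = [] := rfl
  rw [hflat, hnil] at h
  dsimp only
  exact h

-- ---- segment-tree theory for the B side ----

def pmax (l : List (Option Int)) : Option Int := l.foldr qmax none

theorem qmax_none_right (a : Option Int) : qmax a none = a := by cases a <;> rfl

theorem qmax_assoc (a b c : Option Int) : qmax (qmax a b) c = qmax a (qmax b c) := by
  cases a <;> cases b <;> cases c <;> simp [qmax] <;> split_ifs <;> first | rfl | omega

theorem pmax_append (u v : List (Option Int)) : pmax (u ++ v) = qmax (pmax u) (pmax v) := by
  induction u with
  | nil => rfl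
  | cons a u ih =>
    simp only [List.cons_append, pmax, List.foldr_cons] at *
    rw [ih, ← qmax_assoc]

inductive SegOk : Seg → Nat → Prop
  | leaf (v : Option Int) : SegOk (.leaf v) 1
  | node (mx : Option Int) (l r : Seg) (n : Nat) (hn : 2 ≤ n)
      (hl : SegOk l (n / 2)) (hr : SegOk r (n - n / 2))
      (hmx : mx = qmax (segTop l) (segTop r)) : SegOk (.node mx l r) n

def leaves : Seg → List (Option Int)
  | .leaf v => [v]
  | .node _ l r => leaves l ++ leaves r

theorem leaves_length {s : Seg} {n : Nat} (h : SegOk s n) : (leaves s).length = n := by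
  induction h with
  | leaf v => rfl
  | node mx l r n hn hl hr hmx ihl ihr => simp [leaves, ihl, ihr]; omega

theorem segTop_pmax {s : Seg} {n : Nat} (h : SegOk s n) : segTop s = pmax (leaves s) := by
  induction h with
  | leaf v => simp [segTop, leaves, pmax, qmax_none_right]
  | node mx l r n hn hl hr hmx ihl ihr =>
    show mx = pmax (leaves l ++ leaves r)
    rw [pmax_append, hmx, ihl, ihr]

theorem segTop_emptySeg (lo hi : Nat) : segTop (emptySeg lo hi) = none := by
  rw [emptySeg]; split <;> rfl

theorem emptySeg_ok (lo hi : Nat) (h : lo < hi) :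
    SegOk (emptySeg lo hi) (hi - lo) ∧ leaves (emptySeg lo hi) = List.replicate (hi - lo) none := by
  have H : ∀ fuel lo hi, hi - lo ≤ fuel → lo < hi →
      SegOk (emptySeg lo hi) (hi - lo) ∧ leaves (emptySeg lo hi) = List.replicate (hi - lo) none := by
    intro fuel
    induction fuel with
    | zero => intro lo hi h1 h2; omega
    | succ fuel ih =>
      intro lo hi h1 h2
      rw [emptySeg]
      by_cases hb : hi - lo ≤ 1
      · rw [if_pos hb]
        have : hi - lo = 1 := by omega
        rw [this]
        exact ⟨SegOk.leaf none, rfl⟩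
      · rw [if_neg hb]
        have hmid1 : lo < (lo + hi) / 2 := by omega
        have hmid2 : (lo + hi) / 2 < hi := by omega
        obtain ⟨ok1, lv1⟩ := ih lo ((lo + hi) / 2) (by omega) hmid1
        obtain ⟨ok2, lv2⟩ := ih ((lo + hi) / 2) hi (by omega) hmid2
        have e1 : (lo + hi) / 2 - lo = (hi - lo) / 2 := by omega
        have e2 : hi - (lo + hi) / 2 = (hi - lo) - (hi - lo) / 2 := by omega
        constructor
        · exact SegOk.node none _ _ (hi - lo) (by omega) (e1 ▸ ok1) (e2 ▸ ok2)
            (by rw [segTop_emptySeg, segTop_emptySeg]; rfl)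
        · show leaves (emptySeg lo ((lo + hi) / 2)) ++ leaves (emptySeg ((lo + hi) / 2) hi)
              = List.replicate (hi - lo) none
          rw [lv1, lv2, e1, e2, List.replicate_append_replicate]
          congr 1
          omega
  exact H (hi - lo) lo hi le_rfl h

theorem segTop_update (s : Seg) (lo hi pos : Nat) (val : Int) :
    segTop (updateSeg s lo hi pos val) = some (bump (segTop s) val) := by
  cases s with
  | leaf v => rfl
  | node mx l r =>
    simp only [updateSeg]
    split <;> rfl

theorem qmax_bump_left (a b : Option Int) (v : Int) :
    qmax (some (bump a v)) b = some (bump (qmax a b) v) := by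
  cases a <;> cases b <;> simp [qmax, bump] <;> split_ifs <;> first | rfl | omega

theorem qmax_bump_right (a b : Option Int) (v : Int) :
    qmax a (some (bump b v)) = some (bump (qmax a b) v) := by
  cases a <;> cases b <;> simp [qmax, bump] <;> split_ifs <;> first | rfl | omega

theorem update_ok {s : Seg} {n : Nat} (h : SegOk s n) :
    ∀ (lo hi pos : Nat) (val : Int), hi = lo + n → lo ≤ pos → pos < hi →
    SegOk (updateSeg s lo hi pos val) n ∧
    leaves (updateSeg s lo hi pos val)
      = (leaves s).set (pos - lo) (some (bump ((leaves s).getD (pos - lo) none) val)) := by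
  induction h with
  | leaf v =>
    intro lo hi pos val h1 h2 h3
    have : pos = lo := by omega
    subst this
    simp [updateSeg, leaves]
    exact SegOk.leaf _
  | node mx l r n hn hl hr hmx ihl ihr =>
    intro lo hi pos val h1 h2 h3
    have hmid : (lo + hi) / 2 = lo + n / 2 := by omega
    have hll : (leaves l).length = n / 2 := leaves_length hl
    simp only [updateSeg, hmid]
    by_cases hp : pos < lo + n / 2
    · rw [if_pos hp]
      obtain ⟨ok1, lv1⟩ := ihl lo (lo + n / 2) pos val rfl h2 hp
      have hj : pos - lo < (leaves l).length := by omega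
      constructor
      · refine SegOk.node _ _ _ n hn ok1 hr ?_
        rw [segTop_update, hmx, qmax_bump_left]
      · simp only [leaves]
        rw [lv1, List.set_append_left _ _ hj, List.getD_append _ _ _ _ hj]
    · rw [if_neg hp]
      obtain ⟨ok2, lv2⟩ := ihr (lo + n / 2) hi pos val (by omega) (by omega) h3
      constructor
      · refine SegOk.node _ _ _ n hn hl ok2 ?_
        rw [segTop_update, hmx, qmax_bump_right]
      · simp only [leaves]
        rw [lv2, List.set_append_right _ _ (by omega : (leaves l).length ≤ pos - lo)]
        have e : pos - (lo + n / 2) = pos - lo - (leaves l).length := by omega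
        rw [e]
        congr 2
        rw [List.getD_append_right _ _ _ _ (by omega : (leaves l).length ≤ pos - lo)]

theorem query_spec {s : Seg} {n : Nat} (h : SegOk s n) :
    ∀ (lo hi k : Nat), hi = lo + n →
      querySeg s lo hi k = pmax ((leaves s).take (k - lo)) := by
  induction h with
  | leaf v =>
    intro lo hi k h1
    rw [querySeg]
    by_cases h2 : k ≤ lo
    · rw [if_pos h2]
      have : k - lo = 0 := by omega
      simp [this, pmax]
    · rw [if_neg h2]
      have : hi ≤ k := by omega
      rw [if_pos this]
      have ht : (leaves (Seg.leaf v)).take (k - lo) = [v] := by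
        have h5 : 1 ≤ k - lo := by omega
        simp only [leaves]
        exact List.take_of_length_le (by simpa using h5)
      rw [ht]
      simp [segTop, pmax, qmax_none_right]
  | node mx l r n hn hl hr hmx ihl ihr =>
    intro lo hi k h1
    have hmid : (lo + hi) / 2 = lo + n / 2 := by omega
    have hll : (leaves l).length = n / 2 := leaves_length hl
    have hlr : (leaves r).length = n - n / 2 := leaves_length hr
    rw [querySeg]
    by_cases h2 : k ≤ lo
    · rw [if_pos h2]
      have : k - lo = 0 := by omega
      simp [this, pmax]
    · rw [if_neg h2]
      by_cases h3 : hi ≤ k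
      · rw [if_pos h3]
        have : (leaves (Seg.node mx l r)).take (k - lo) = leaves (Seg.node mx l r) := by
          apply List.take_of_length_le
          have := leaves_length (SegOk.node mx l r n hn hl hr hmx)
          omega
        rw [this]
        exact segTop_pmax (SegOk.node mx l r n hn hl hr hmx)
      · rw [if_neg h3]
        simp only [hmid]
        rw [ihl lo (lo + n / 2) k rfl, ihr (lo + n / 2) hi k (by omega)]
        show _ = pmax ((leaves l ++ leaves r).take (k - lo))
        rw [List.take_append, pmax_append, hll]
        have e : k - (lo + n / 2) = k - lo - n / 2 := by omega
        rw [e]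

-- ---- binary search (idxGo) correctness on a strictly sorted list ----

theorem idxGo_spec (xs : List Int) (hs : xs.Pairwise (· < ·)) (v : Int) :
    ∀ (lo hi : Nat), hi ≤ xs.length → lo ≤ hi →
      (∀ i, i < lo → xs.getD i 0 < v) →
      (∀ i, hi ≤ i → i < xs.length → ¬ xs.getD i 0 < v) →
      (idxGo xs v lo hi ≤ xs.length ∧
       (∀ i, i < idxGo xs v lo hi → xs.getD i 0 < v) ∧
       (∀ i, idxGo xs v lo hi ≤ i → i < xs.length → ¬ xs.getD i 0 < v)) := by
  have mono : ∀ i j, i < j → j < xs.length → xs.getD i 0 < xs.getD j 0 := by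
    intro i j hij hj
    have hi : i < xs.length := by omega
    rw [List.getD_eq_getElem _ _ hi, List.getD_eq_getElem _ _ hj]
    exact List.pairwise_iff_getElem.mp hs i j hi hj hij
  have H : ∀ fuel lo hi, hi - lo ≤ fuel → hi ≤ xs.length → lo ≤ hi →
      (∀ i, i < lo → xs.getD i 0 < v) →
      (∀ i, hi ≤ i → i < xs.length → ¬ xs.getD i 0 < v) →
      (idxGo xs v lo hi ≤ xs.length ∧
       (∀ i, i < idxGo xs v lo hi → xs.getD i 0 < v) ∧
       (∀ i, idxGo xs v lo hi ≤ i → i < xs.length → ¬ xs.getD i 0 < v)) := by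
    intro fuel
    induction fuel with
    | zero =>
      intro lo hi h0 h1 h2 h3 h4
      have : lo = hi := by omega
      subst this
      rw [idxGo, if_neg (by omega)]
      exact ⟨by omega, h3, h4⟩
    | succ fuel ih =>
      intro lo hi h0 h1 h2 h3 h4
      rw [idxGo]
      by_cases hlt : lo < hi
      · rw [if_pos hlt]
        simp only
        by_cases hm : xs.getD ((lo + hi) / 2) 0 < v
        · rw [if_pos hm]
          refine ih ((lo + hi) / 2 + 1) hi (by omega) h1 (by omega) ?_ h4
          intro i hi2
          by_cases hi3 : i < (lo + hi) / 2
          · exact lt_trans (mono i ((lo + hi) / 2) hi3 (by omega)) hm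
          · have : i = (lo + hi) / 2 := by omega
            rw [this]; exact hm
        · rw [if_neg hm]
          refine ih lo ((lo + hi) / 2) (by omega) (by omega) (by omega) h3 ?_
          intro i hi2 hi3 hcon
          by_cases hi4 : (lo + hi) / 2 < i
          · exact hm (lt_trans (mono ((lo + hi) / 2) i hi4 hi3) hcon)
          · have : i = (lo + hi) / 2 := by omega
            rw [this] at hcon; exact hm hcon
      · rw [if_neg hlt]
        have : lo = hi := by omega
        subst this
        exact ⟨by omega, h3, h4⟩
  intro lo hi h1 h2 h3 h4
  exact H (hi - lo) lo hi le_rfl h1 h2 h3 h4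

-- idx of a member: in range and hits exactly the member's position
theorem idxGo_mem (xs : List Int) (hs : xs.Pairwise (· < ·)) (a : Int) (ha : a ∈ xs) :
    idxGo xs a 0 xs.length < xs.length ∧ xs.getD (idxGo xs a 0 xs.length) 0 = a := by
  obtain ⟨p, hp, hpa⟩ := List.mem_iff_getElem.mp ha
  have hpd : xs.getD p 0 = a := by rw [List.getD_eq_getElem _ _ hp, hpa]
  obtain ⟨hr1, hr2, hr3⟩ := idxGo_spec xs hs a 0 xs.length le_rfl (by omega)
    (by omega) (by omega)
  set r := idxGo xs a 0 xs.length with hr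
  have hrp : r ≤ p := by
    by_contra hcon
    have := hr2 p (by omega)
    omega
  have hrlen : r < xs.length := by omega
  have mono : ∀ i j, i < j → j < xs.length → xs.getD i 0 < xs.getD j 0 := by
    intro i j hij hj
    have hi : i < xs.length := by omega
    rw [List.getD_eq_getElem _ _ hi, List.getD_eq_getElem _ _ hj]
    exact List.pairwise_iff_getElem.mp hs i j hi hj hij
  refine ⟨hrlen, ?_⟩
  by_cases hq : r < p
  · exfalso
    have h1 := mono r p hq hp
    have h2 := hr3 r le_rfl hrlen
    omega
  · have : r = p := by omega
    rw [this, hpd]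

-- order embedding of idxGo on members
theorem idxGo_lt_iff (xs : List Int) (hs : xs.Pairwise (· < ·)) (c a : Int)
    (hc : c ∈ xs) (ha : a ∈ xs) :
    (idxGo xs c 0 xs.length < idxGo xs a 0 xs.length) ↔ c < a := by
  obtain ⟨hc1, hc2⟩ := idxGo_mem xs hs c hc
  obtain ⟨ha1, ha2⟩ := idxGo_mem xs hs a ha
  have mono : ∀ i j, i < j → j < xs.length → xs.getD i 0 < xs.getD j 0 := by
    intro i j hij hj
    have hi : i < xs.length := by omega
    rw [List.getD_eq_getElem _ _ hi, List.getD_eq_getElem _ _ hj]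
    exact List.pairwise_iff_getElem.mp hs i j hi hj hij
  constructor
  · intro h
    have := mono _ _ h ha1
    omega
  · intro h
    rcases Nat.lt_trichotomy (idxGo xs c 0 xs.length) (idxGo xs a 0 xs.length) with h' | h' | h'
    · exact h'
    · exfalso; rw [h', ha2] at hc2; omega
    · exfalso; have := mono _ _ h' hc1; omega

-- ---- per-leaf characterisation of the tree built by successive updates ----

def treeOf (xs : List Int) (m : Nat) (P : List (Int × Int)) : Seg :=
  P.foldl (fun tr cd => updateSeg tr 0 m (idxGo xs cd.1 0 m) cd.2) (emptySeg 0 m)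

def leafVal (xs : List Int) (m : Nat) (P : List (Int × Int)) (j : Nat) : Option Int :=
  P.foldl (fun acc cd => if idxGo xs cd.1 0 m = j then some (bump acc cd.2) else acc) none

theorem treeOf_ok (xs : List Int) (m : Nat) (hm : 0 < m) (hlen : m = xs.length)
    (hs : xs.Pairwise (· < ·)) (P : List (Int × Int)) (hP : ∀ cd ∈ P, cd.1 ∈ xs) :
    SegOk (treeOf xs m P) m ∧
    (∀ j, j < m → (leaves (treeOf xs m P)).getD j none = leafVal xs m P j) := by
  subst hlen
  induction P using List.reverseRecOn with
  | nil =>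
    obtain ⟨ok, lv⟩ := emptySeg_ok 0 xs.length (by omega)
    simp only [Nat.sub_zero] at ok lv
    refine ⟨ok, ?_⟩
    intro j hj
    show (leaves (treeOf xs xs.length [])).getD j none = leafVal xs xs.length [] j
    have ht : treeOf xs xs.length [] = emptySeg 0 xs.length := rfl
    rw [ht, lv, List.getD_eq_getElem _ _ (by simpa using hj)]
    simp [leafVal]
  | append_singleton P cd ihP =>
    have hP' : ∀ p ∈ P, p.1 ∈ xs := fun p hp => hP p (by simp [hp])
    obtain ⟨ok, lv⟩ := ihP hP'
    have hcd : cd.1 ∈ xs := hP cd (by simp)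
    have hpos : idxGo xs cd.1 0 xs.length < xs.length := by
      have := (idxGo_mem xs hs cd.1 hcd).1
      omega
    have hT : treeOf xs xs.length (P ++ [cd])
        = updateSeg (treeOf xs xs.length P) 0 xs.length (idxGo xs cd.1 0 xs.length) cd.2 := by
      simp [treeOf, List.foldl_append]
    obtain ⟨ok', lv'⟩ := update_ok ok 0 xs.length (idxGo xs cd.1 0 xs.length) cd.2 (by omega) (by omega) hpos
    rw [hT]
    refine ⟨ok', ?_⟩
    intro j hj
    have hll : (leaves (treeOf xs xs.length P)).length = xs.length := leaves_length ok
    have hLV : leafVal xs xs.length (P ++ [cd]) j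
        = if idxGo xs cd.1 0 xs.length = j then some (bump (leafVal xs xs.length P j) cd.2)
          else leafVal xs xs.length P j := by
      simp [leafVal, List.foldl_append]
    rw [lv', hLV]
    simp only [Nat.sub_zero]
    by_cases he : idxGo xs cd.1 0 xs.length = j
    · rw [if_pos he, he]
      rw [List.getD_eq_getElem _ _ (by simp [hll]; omega), List.getElem_set_self]
      rw [lv j hj]
    · rw [if_neg he]
      rw [List.getD_eq_getElem _ _ (by simp [hll]; omega),
          List.getElem_set_ne he, ← List.getD_eq_getElem _ _ (by omega : j < (leaves (treeOf xs xs.length P)).length), lv j hj]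

-- ---- from prefix-max queries to existentials over the stored pairs ----

theorem pmax_pred (p : Int → Bool) (hp : ∀ x y : Int, p (if x > y then x else y) = (p x || p y))
    (l : List (Option Int)) :
    (pmax l).elim false p = l.any (fun o => o.elim false p) := by
  induction l with
  | nil => rfl
  | cons a l ih =>
    show (qmax a (pmax l)).elim false p = _
    cases a with
    | none => simpa [qmax] using ih
    | some x =>
      cases hq : pmax l with
      | none =>
        have hany : l.any (fun o => o.elim false p) = false := by rw [← ih, hq]; rfl
        simp [qmax, hany]
      | some y =>
        have hany : l.any (fun o => o.elim false p) = p y := by rw [← ih, hq]; rfl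
        simp [qmax, hany, hp]

theorem leafVal_pred (p : Int → Bool) (hp : ∀ x y : Int, p (if x > y then x else y) = (p x || p y))
    (xs : List Int) (m : Nat) (j : Nat) (P : List (Int × Int)) :
    (leafVal xs m P j).elim false p
      = P.any (fun cd => decide (idxGo xs cd.1 0 m = j) && p cd.2) := by
  have hbump : ∀ (acc : Option Int) (v : Int), p (bump acc v) = (acc.elim false p || p v) := by
    intro acc v
    cases acc with
    | none => simp [bump]
    | some o => simp [bump, hp]; rw [Bool.or_comm]
  have H : ∀ (P : List (Int × Int)) (acc : Option Int),
      ((P.foldl (fun acc cd => if idxGo xs cd.1 0 m = j then some (bump acc cd.2) else acc) acc).elim false p)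
        = (acc.elim false p || P.any (fun cd => decide (idxGo xs cd.1 0 m = j) && p cd.2)) := by
    intro P
    induction P with
    | nil => intro acc; simp
    | cons cd P ih =>
      intro acc
      simp only [List.foldl_cons, List.any_cons]
      -- below
      by_cases he : idxGo xs cd.1 0 m = j
      · rw [if_pos he]
        rw [ih]
        simp [hbump, he, Bool.or_assoc, Bool.or_comm, Bool.or_left_comm]
      · rw [if_neg he]
        rw [ih]
        simp [he]
  simpa using H P none


theorem query_any (p : Int → Bool) (hp : ∀ x y : Int, p (if x > y then x else y) = (p x || p y))
    (xs : List Int) (m : Nat) (hm : 0 < m) (hlen : m = xs.length)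
    (hs : xs.Pairwise (· < ·)) (P : List (Int × Int)) (hP : ∀ cd ∈ P, cd.1 ∈ xs)
    (k : Nat) (hk : k ≤ m) :
    (querySeg (treeOf xs m P) 0 m k).elim false p
      = P.any (fun cd => decide (idxGo xs cd.1 0 m < k) && p cd.2) := by
  obtain ⟨ok, lv⟩ := treeOf_ok xs m hm hlen hs P hP
  have hq := query_spec ok 0 m k (by omega)
  rw [Nat.sub_zero] at hq
  rw [hq, pmax_pred p hp]
  have hll : (leaves (treeOf xs m P)).length = m := leaves_length ok
  have hiff : ((leaves (treeOf xs m P)).take k).any (fun o => o.elim false p) = true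
      ↔ P.any (fun cd => decide (idxGo xs cd.1 0 m < k) && p cd.2) = true := by
    rw [List.any_eq_true, List.any_eq_true]
    constructor
    · rintro ⟨o, hmem, hpo⟩
      obtain ⟨j, hj, hoj⟩ := List.mem_take_iff_getElem.mp hmem
      have hjk : j < k := by omega
      have hjm : j < m := by omega
      have hgd : (leaves (treeOf xs m P)).getD j none = o := by
        rw [List.getD_eq_getElem _ _ (by omega), hoj]
      rw [lv j hjm] at hgd
      have := leafVal_pred p hp xs m j P
      rw [hgd, hpo] at this
      obtain ⟨cd, hcd, hcd2⟩ := List.any_eq_true.mp this.symm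
      refine ⟨cd, hcd, ?_⟩
      simp only [Bool.and_eq_true, decide_eq_true_eq] at hcd2 ⊢
      exact ⟨by omega, hcd2.2⟩
    · rintro ⟨cd, hcd, hcd2⟩
      simp only [Bool.and_eq_true, decide_eq_true_eq] at hcd2
      set j := idxGo xs cd.1 0 m with hjdef
      have hjk : j < k := hcd2.1
      have hjm : j < m := by omega
      refine ⟨(leaves (treeOf xs m P)).getD j none, ?_, ?_⟩
      · rw [List.getD_eq_getElem _ _ (by omega)]
        exact List.mem_take_iff_getElem.mpr ⟨j, by omega, rfl⟩
      · rw [lv j hjm, leafVal_pred p hp xs m j P]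
        exact List.any_eq_true.mpr ⟨cd, hcd, by
          simp only [Bool.and_eq_true, decide_eq_true_eq]
          exact ⟨rfl, hcd2.2⟩⟩
  cases hL : ((leaves (treeOf xs m P)).take k).any (fun o => o.elim false p) with
  | true => exact (hiff.mp hL).symm
  | false =>
    cases hR : P.any (fun cd => decide (idxGo xs cd.1 0 m < k) && p cd.2) with
    | false => rfl
    | true => rw [hiff.mpr hR] at hL; exact absurd hL (by simp)

theorem any_congr_mem {α : Type} (l : List α) (f g : α → Bool)
    (h : ∀ x ∈ l, f x = g x) : l.any f = l.any g := by
  induction l with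
  | nil => rfl
  | cons x l ih =>
    simp only [List.any_cons]
    rw [h x (by simp), ih (fun y hy => h y (by simp [hy]))]

theorem any_or_split (P : List (Int × Int)) (f g : Int × Int → Bool) :
    P.any (fun cd => f cd || g cd) = (P.any f || P.any g) := by
  induction P with
  | nil => rfl
  | cons cd P ih =>
    simp [List.any_cons, ih, Bool.or_assoc, Bool.or_left_comm]

theorem conflictsT_eq (xs : List Int) (m : Nat) (hm : 0 < m) (hlen : m = xs.length)
    (hs : xs.Pairwise (· < ·)) (P : List (Int × Int)) (hP : ∀ cd ∈ P, cd.1 ∈ xs)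
    (a b : Int) (ha : a ∈ xs) (hb : b ∈ xs) :
    conflictsT xs m (treeOf xs m P) a b = conflictsB a b P := by
  subst hlen
  have hp1 : ∀ x y : Int, (fun v => decide (v > a)) (if x > y then x else y)
      = ((fun v => decide (v > a)) x || (fun v => decide (v > a)) y) := by
    intro x y
    simp only
    split_ifs <;> simp <;> omega
  have hp2 : ∀ x y : Int, (fun v => decide (v ≥ b)) (if x > y then x else y)
      = ((fun v => decide (v ≥ b)) x || (fun v => decide (v ≥ b)) y) := by
    intro x y
    simp only
    split_ifs <;> simp <;> omega
  have haidx := idxGo_mem xs hs a ha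
  have hbidx := idxGo_mem xs hs b hb
  have hq1 := query_any (fun v => decide (v > a)) hp1 xs xs.length hm rfl hs P hP
      (idxGo xs a 0 xs.length + 1) (by omega)
  have hq2 := query_any (fun v => decide (v ≥ b)) hp2 xs xs.length hm rfl hs P hP
      (idxGo xs b 0 xs.length) (by omega)
  have he1 : P.any (fun cd => decide (idxGo xs cd.1 0 xs.length < idxGo xs a 0 xs.length + 1)
        && decide (cd.2 > a))
      = P.any (fun cd => decide (a ≥ cd.1) && decide (a < cd.2)) := by
    apply any_congr_mem
    intro cd hcd
    have hmem := hP cd hcd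
    have hlt := idxGo_lt_iff xs hs a cd.1 ha hmem
    congr 1
    simp only [decide_eq_decide]
    constructor
    · intro h
      have : ¬ (idxGo xs a 0 xs.length < idxGo xs cd.1 0 xs.length) := by omega
      rw [hlt] at this
      omega
    · intro h
      have : ¬ (a < cd.1) := by omega
      rw [← hlt] at this
      omega
  have he2 : P.any (fun cd => decide (idxGo xs cd.1 0 xs.length < idxGo xs b 0 xs.length)
        && decide (cd.2 ≥ b))
      = P.any (fun cd => decide (b > cd.1) && decide (b ≤ cd.2)) := by
    apply any_congr_mem
    intro cd hcd
    have hmem := hP cd hcd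
    have hlt := idxGo_lt_iff xs hs cd.1 b hmem hb
    congr 1
    simp only [decide_eq_decide]
    constructor
    · intro h
      exact hlt.mp h
    · intro h
      exact hlt.mpr h
  have hcB : conflictsB a b P
      = (P.any (fun cd => decide (a ≥ cd.1) && decide (a < cd.2))
         || P.any (fun cd => decide (b > cd.1) && decide (b ≤ cd.2))) := by
    unfold conflictsB predA
    rw [← any_or_split]
  rw [hcB]
  unfold conflictsT
  rw [hq1, hq2, he1, he2]
  cases P.any (fun cd => decide (a ≥ cd.1) && decide (a < cd.2)) <;> simp

theorem pyRange_two_cons (a b : Int) :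
    PySem.List.pyRange a b 2 = if a < b then a :: PySem.List.pyRange (a + 2) b 2 else [] := by
  rw [PySem.List.pyRange_of_pos a b (by norm_num),
      PySem.List.pyRange_of_pos (a + 2) b (by norm_num)]
  by_cases h : a < b
  · rw [if_pos h, if_pos h]
    by_cases h2 : a + 2 < b
    · rw [if_pos h2]
      have e : ((b - a + 2 - 1) / 2).toNat = ((b - (a + 2) + 2 - 1) / 2).toNat + 1 := by omega
      rw [e, List.range_succ_eq_map]
      simp only [List.map_cons, List.map_map]
      refine congrArg₂ List.cons (by simp) ?_
      apply List.map_congr_left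
      intro k _
      simp only [Function.comp]
      push_cast
      ring
    · rw [if_neg h2]
      have e : ((b - a + 2 - 1) / 2).toNat = 1 := by omega
      rw [e]
      simp
  · rw [if_neg h, if_neg h]
    rfl

theorem pvIdx_mem (L : List Int) (i : Nat) (h : i < L.length) : pvIdx L (i : Int) ∈ L := by
  unfold pvIdx
  rw [PySem.List.pyGet?_natCast, List.getElem?_eq_getElem h]
  exact List.getElem_mem h

theorem goBT_eq_goList (L xs : List Int) (hxs : ∀ y ∈ L, y ∈ xs)
    (hs : xs.Pairwise (· < ·)) :
    ∀ (fuel i : Nat) (Cp Jp : List (Int × Int)) (out : String),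
      L.length - i ≤ fuel →
      (∀ cd ∈ Cp, cd.1 ∈ xs) → (∀ cd ∈ Jp, cd.1 ∈ xs) →
      goBT L xs xs.length (treeOf xs xs.length Cp) (treeOf xs xs.length Jp) out i
        = goList L (PySem.List.pyRange (i : Int) ((L.length : Int) - 1) 2) Cp Jp out := by
  intro fuel
  induction fuel with
  | zero =>
    intro i Cp Jp out h0 hC hJ
    have hR : PySem.List.pyRange (i : Int) ((L.length : Int) - 1) 2 = [] := by
      rw [pyRange_two_cons, if_neg (by omega)]
    rw [goBT, if_neg (by omega), hR]
    rfl
  | succ fuel ih =>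
    intro i Cp Jp out h0 hC hJ
    rw [goBT]
    by_cases hcond : i + 1 < L.length
    · rw [if_pos hcond]
      have hR : PySem.List.pyRange (i : Int) ((L.length : Int) - 1) 2
          = (i : Int) :: PySem.List.pyRange ((i : Int) + 2) ((L.length : Int) - 1) 2 := by
        rw [pyRange_two_cons, if_pos (by omega)]
      rw [hR]
      simp only [goList]
      have hmema : pvIdx L (i : Int) ∈ xs := hxs _ (pvIdx_mem L i (by omega))
      have hmemb : pvIdx L ((i : Int) + 1) ∈ xs := by
        have : ((i : Int) + 1) = ((i + 1 : Nat) : Int) := by push_cast; ring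
        rw [this]
        exact hxs _ (pvIdx_mem L (i + 1) hcond)
      have hm : 0 < xs.length := List.length_pos_of_mem hmema
      have hcC := conflictsT_eq xs xs.length hm rfl hs Cp hC
          (pvIdx L (i : Int)) (pvIdx L ((i : Int) + 1)) hmema hmemb
      have hcJ := conflictsT_eq xs xs.length hm rfl hs Jp hJ
          (pvIdx L (i : Int)) (pvIdx L ((i : Int) + 1)) hmema hmemb
      simp only [hcC, hcJ]
      have hstep : ((i : Int) + 2) = ((i + 2 : Nat) : Int) := by push_cast; ring
      cases hc : conflictsB (pvIdx L (i : Int)) (pvIdx L ((i : Int) + 1)) Cp with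
      | false =>
        simp only [Bool.not_false, if_pos]
        have htr : updateSeg (treeOf xs xs.length Cp) 0 xs.length
              (idxGo xs (pvIdx L (i : Int)) 0 xs.length) (pvIdx L ((i : Int) + 1))
            = treeOf xs xs.length (Cp ++ [(pvIdx L (i : Int), pvIdx L ((i : Int) + 1))]) := by
          simp [treeOf, List.foldl_append]
        rw [htr, hstep,
            ih (i + 2) (Cp ++ [(pvIdx L (i : Int), pvIdx L ((i : Int) + 1))]) Jp (out ++ "C")
              (by omega)
              (by intro cd hcd
                  rcases List.mem_append.mp hcd with h' | h'
                  · exact hC cd h'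
                  · simp at h'; rw [h']; exact hmema)
              hJ]
      | true =>
        simp only [Bool.not_true, Bool.false_eq_true, if_false]
        cases hj : conflictsB (pvIdx L (i : Int)) (pvIdx L ((i : Int) + 1)) Jp with
        | false =>
          simp only [Bool.not_false, if_pos]
          have htr : updateSeg (treeOf xs xs.length Jp) 0 xs.length
                (idxGo xs (pvIdx L (i : Int)) 0 xs.length) (pvIdx L ((i : Int) + 1))
              = treeOf xs xs.length (Jp ++ [(pvIdx L (i : Int), pvIdx L ((i : Int) + 1))]) := by
            simp [treeOf, List.foldl_append]
          rw [htr, hstep,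
              ih (i + 2) Cp (Jp ++ [(pvIdx L (i : Int), pvIdx L ((i : Int) + 1))]) (out ++ "J")
                (by omega) hC
                (by intro cd hcd
                    rcases List.mem_append.mp hcd with h' | h'
                    · exact hJ cd h'
                    · simp at h'; rw [h']; exact hmema)]
        | true =>
          simp
    · have hR : PySem.List.pyRange (i : Int) ((L.length : Int) - 1) 2 = [] := by
        rw [pyRange_two_cons, if_neg (by omega)]
      rw [if_neg hcond, hR]
      rfl

theorem tache_alt_eq_goList (L : List Int) (t : Int) (h2 : 2 ≤ L.length) :
    tache_alt L t = goList L (PySem.List.pyRange 2 ((L.length : Int) - 1) 2)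
      [(pvIdx L 0, pvIdx L 1)] [] "C" := by
  have hs : (PySem.List.sorted (PySem.Set.ofList L) (fun x => x) false).Pairwise (· < ·) :=
    PySem.List.sorted_ofList_pairwise_lt L
  set xs := PySem.List.sorted (PySem.Set.ofList L) (fun x => x) false with hxsdef
  have hxs : ∀ y ∈ L, y ∈ xs := by
    intro y hy
    rw [hxsdef, PySem.List.mem_sorted, PySem.Set.mem_ofList]
    exact hy
  have hC0 : updateSeg (emptySeg 0 xs.length) 0 xs.length
        (idxGo xs (pvIdx L 0) 0 xs.length) (pvIdx L 1)
      = treeOf xs xs.length [(pvIdx L 0, pvIdx L 1)] := by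
    simp [treeOf]
  have hJ0 : emptySeg 0 xs.length = treeOf xs xs.length [] := rfl
  have h0 : pvIdx L 0 ∈ xs := by
    have : pvIdx L ((0 : Nat) : Int) ∈ L := pvIdx_mem L 0 (by omega)
    simpa using hxs _ this
  have h := goBT_eq_goList L xs hxs hs L.length 2 [(pvIdx L 0, pvIdx L 1)] [] "C"
      (by omega)
      (by intro cd hcd; simp at hcd; rw [hcd]; exact h0)
      (by intro cd hcd; simp at hcd)
  have hbeta : tache_alt L t = goBT L xs xs.length
      (updateSeg (emptySeg 0 xs.length) 0 xs.length
        (idxGo xs (pvIdx L 0) 0 xs.length) (pvIdx L 1))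
      (emptySeg 0 xs.length) "C" 2 := rfl
  rw [hbeta, hC0, hJ0]
  have hc2 : ((2 : Nat) : Int) = 2 := by norm_num
  rw [hc2] at h
  exact h

-- ===== VERDICT (by name: the statement is the Claim_ definition above) =====
theorem tache_spec : Claim_equal_tache := by
  intro L t _ hpre
  unfold Spec_tache
  rw [tache_eq_goList, tache_alt_eq_goList L t hpre]
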